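-- pv_equiv track=rewrite | github.com/mfaishalif/binger-lama | main.py | validasi4Digit
-- ===== SOURCE A (Python) =====
-- def validasi4Digit(n):
--     count = 0
--     while n >0:
--         count+=1
--         n//=10
--
--     if count==4:
--         return True
--     else: return False
-- ===== SOURCE B (Python) =====
-- def validasi4Digit(n):
--     return 1000 <= n < 10000
-- ===== Notes on version B (the rewrite author's own statement) =====
-- stated objective: simpler
-- what changed: Replaced the digit-counting division loop with a single closed-form range test 1000 <= n < 10000.
import Mathlib
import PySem

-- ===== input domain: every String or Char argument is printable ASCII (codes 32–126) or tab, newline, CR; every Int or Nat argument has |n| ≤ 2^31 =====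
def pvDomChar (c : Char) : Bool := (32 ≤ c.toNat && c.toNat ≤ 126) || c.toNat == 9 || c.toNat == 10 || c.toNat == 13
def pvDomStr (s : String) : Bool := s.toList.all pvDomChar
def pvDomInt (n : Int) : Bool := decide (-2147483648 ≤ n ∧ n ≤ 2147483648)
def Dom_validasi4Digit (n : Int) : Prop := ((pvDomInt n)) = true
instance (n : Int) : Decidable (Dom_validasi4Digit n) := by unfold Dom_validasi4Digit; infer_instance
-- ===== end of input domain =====

-- B replaces A's digit-counting division loop with the closed-form range test 1000 ≤ n < 10000 (simpler).


-- ===== PORT A =====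
-- the 'while n > 0: count += 1; n //= 10' loop of A, as structural recursion on n.toNat
def validasi4DigitLoop (n count : Int) : Int :=
  if h : 0 < n then
    validasi4DigitLoop (PySem.Int.floordiv n 10) (count + 1)
  else count
termination_by n.toNat
decreasing_by
  rw [PySem.Int.floordiv_eq_ediv_of_pos (by omega)]
  omega

def validasi4Digit (n : Int) : Bool :=
  let count := validasi4DigitLoop n 0
  if count == 4 then true else false

-- ===== PORT B =====
def validasi4Digit_alt (n : Int) : Bool := decide (1000 ≤ n ∧ n < 10000)

-- ===== PRECONDITION & SPEC =====
def Spec_validasi4Digit (n : Int) (out : Bool) : Prop := out = validasi4Digit_alt n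
instance (n : Int) (out : Bool) : Decidable (Spec_validasi4Digit n out) := by unfold Spec_validasi4Digit; infer_instance

-- ===== CLAIM (what is proved, stated in full; the proofs are below) =====
def Claim_equal_validasi4Digit : Prop := ∀ (n : Int), Dom_validasi4Digit n → Spec_validasi4Digit n (validasi4Digit n)

-- ===== LEMMAS AND PROOFS =====

-- the loop never decreases the accumulator
theorem validasi4DigitLoop_le (n count : Int) : count ≤ validasi4DigitLoop n count := by
  rw [validasi4DigitLoop]
  split
  · have := validasi4DigitLoop_le (PySem.Int.floordiv n 10) (count + 1)
    omega
  · omega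
termination_by n.toNat
decreasing_by
  rw [PySem.Int.floordiv_eq_ediv_of_pos (by omega)]
  omega

-- characterization: the loop returns count + k exactly when n has k digits (k = 0 for n ≤ 0)
theorem validasi4DigitLoop_eq_iff (n count : Int) (k : Nat) :
    validasi4DigitLoop n count = count + k ↔
      (k = 0 ∧ n ≤ 0) ∨ (1 ≤ k ∧ (10 : Int) ^ (k - 1) ≤ n ∧ n < 10 ^ k) := by
  rw [validasi4DigitLoop]
  split
  · rename_i h
    cases k with
    | zero =>
      have hle := validasi4DigitLoop_le (PySem.Int.floordiv n 10) (count + 1)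
      constructor
      · intro heq; omega
      · rintro (⟨_, hn⟩ | ⟨hk, _⟩) <;> omega
    | succ m =>
      have ih := validasi4DigitLoop_eq_iff (PySem.Int.floordiv n 10) (count + 1) m
      have hdle : ∀ q : Int, q ≤ PySem.Int.floordiv n 10 ↔ q * 10 ≤ n :=
        fun q => PySem.Int.le_floordiv_iff_mul_le (by omega)
      have hdlt : ∀ q : Int, PySem.Int.floordiv n 10 < q ↔ n < q * 10 :=
        fun q => PySem.Int.floordiv_lt_iff_lt_mul (by omega)
      constructor
      · intro heq
        have heq' : validasi4DigitLoop (PySem.Int.floordiv n 10) (count + 1) = (count + 1) + m := by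
          push_cast at heq ⊢; omega
        rcases ih.mp heq' with ⟨hm, hle0⟩ | ⟨hm1, hlo, hhi⟩
        · subst hm
          right
          refine ⟨by omega, by simpa using h, ?_⟩
          have := (hdlt 1).mp (by omega)
          simpa using this
        · right
          refine ⟨by omega, ?_, ?_⟩
          · have := (hdle (10 ^ (m - 1))).mp hlo
            have hm' : m - 1 + 1 = m := by omega
            calc (10 : Int) ^ (m + 1 - 1) = 10 ^ (m - 1) * 10 := by
                  rw [show m + 1 - 1 = (m - 1) + 1 by omega, pow_succ]
              _ ≤ n := this
          · have := (hdlt (10 ^ m)).mp hhi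
            calc n < 10 ^ m * 10 := this
              _ = (10 : Int) ^ (m + 1) := (pow_succ 10 m).symm
      · rintro (⟨hk, hn⟩ | ⟨_, hlo, hhi⟩)
        · omega
        · have heq' : validasi4DigitLoop (PySem.Int.floordiv n 10) (count + 1) = (count + 1) + m := by
            apply ih.mpr
            cases m with
            | zero =>
              left
              refine ⟨rfl, ?_⟩
              have := (hdlt 1).mpr (by simpa using hhi)
              omega
            | succ j =>
              right
              refine ⟨by omega, ?_, ?_⟩
              · apply (hdle (10 ^ (j + 1 - 1))).mpr
                have : (10 : Int) ^ (j + 1 - 1) * 10 = 10 ^ (j + 1) := by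
                  rw [show j + 1 - 1 = j by omega, ← pow_succ]
                rw [this]
                simpa using hlo
              · apply (hdlt (10 ^ (j + 1))).mpr
                have : (10 : Int) ^ (j + 1) * 10 = 10 ^ (j + 1 + 1) := (pow_succ 10 (j + 1)).symm
                rw [this]
                simpa using hhi
          push_cast at heq' ⊢
          omega
  · rename_i h
    constructor
    · intro heq
      left
      exact ⟨by omega, by omega⟩
    · rintro (⟨hk, _⟩ | ⟨hk1, hlo, _⟩)
      · omega
      · exfalso
        have hp : (0 : Int) < 10 ^ (k - 1) := pow_pos (by norm_num) _
        omega
termination_by n.toNat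
decreasing_by all_goals
  rw [PySem.Int.floordiv_eq_ediv_of_pos (by omega)]
  omega

-- ===== VERDICT (by name: the statement is the Claim_ definition above) =====
theorem validasi4Digit_spec : Claim_equal_validasi4Digit := by
  intro n _
  unfold Spec_validasi4Digit validasi4Digit validasi4Digit_alt
  have h4 := validasi4DigitLoop_eq_iff n 0 4
  norm_num at h4
  by_cases hc : validasi4DigitLoop n 0 = 4
  · simp [hc, h4.mp hc]
  · have : ¬ (1000 ≤ n ∧ n < 10000) := fun hr => hc (h4.mpr hr)
    simp [hc, this]
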